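-- pv_equiv track=rewrite | github.com/caefalcaoandrade-ux/board-games-online | games/hive_logic.py | _is_connected_without
-- ===== SOURCE A (Python) =====
-- from collections import deque
--
-- DIRECTIONS = [[1, 0], [1, -1], [0, -1], [-1, 0], [-1, 1], [0, 1]]
--
-- def _key(q, r):
--     """Return the string key for axial coordinates ``(q, r)``."""
--     return f"{q},{r}"
--
-- def _parse_key(key):
--     """Parse a ``"q,r"`` string key into an ``(int, int)`` tuple."""
--     parts = key.split(",")
--     return int(parts[0]), int(parts[1])
--
-- def _neighbors(q, r):
--     """Return the six axial neighbors of ``(q, r)`` as lists."""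
--     return [[q + d[0], r + d[1]] for d in DIRECTIONS]
--
-- def _is_connected_without(board, exclude_key):
--     """Check if the hive stays connected after removing the top piece at
--     *exclude_key*.  If the cell is a stack the cell remains (just shorter)."""
--     cells = set()
--     for k in board:
--         if not board[k]:
--             continue
--         if k == exclude_key:
--             if len(board[k]) > 1:
--                 cells.add(k)
--             # single piece: cell disappears
--         else:
--             cells.add(k)
--
--     if len(cells) <= 1:
--         return True
--
--     start = next(iter(cells))
--     visited = {start}
--     queue = deque([start])
--     while queue:
--         curr = queue.popleft()
--         cq, cr = _parse_key(curr)
--         for nq, nr in _neighbors(cq, cr):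
--             nk = _key(nq, nr)
--             if nk in cells and nk not in visited:
--                 visited.add(nk)
--                 queue.append(nk)
--     return len(visited) == len(cells)
-- ===== SOURCE B (Python) =====
-- DIRECTIONS = [[1, 0], [1, -1], [0, -1], [-1, 0], [-1, 1], [0, 1]]
--
-- def _is_connected_without(board, exclude_key):
--     """Connectivity by label propagation: no queue/BFS frontier; repeatedly
--     re-expand the whole visited set until it stops growing (a fixpoint)."""
--     cells = []
--     for k in board:
--         if not board[k]:
--             continue
--         if k == exclude_key:
--             if len(board[k]) > 1:
--                 cells.append(k)
--         else:
--             cells.append(k)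
--     # dict keys are unique, so `cells` is duplicate-free
--     if len(cells) <= 1:
--         return True
--     cell_set = set(cells)
--     visited = [cells[0]]
--     visited_set = {cells[0]}
--     while True:
--         new = list(visited)
--         new_set = set(visited_set)
--         for d in visited:
--             parts = d.split(",")
--             q, r = int(parts[0]), int(parts[1])
--             for dq, dr in DIRECTIONS:
--                 nk = f"{q + dq},{r + dr}"
--                 if nk in cell_set and nk not in new_set:
--                     new.append(nk)
--                     new_set.add(nk)
--         if len(new) == len(visited):
--             break
--         visited, visited_set = new, new_set
--     return len(visited) == len(cells)
-- ===== Notes on version B (the rewrite author's own statement) =====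
-- stated objective: alternative
-- what changed: Replaces the BFS (deque frontier, visited set, per-node expansion) with queue-free label propagation: the whole visited set is re-expanded against the cell set until a fixpoint, then compared to the cell count.
-- outside the precondition, e.g. on _is_connected_without({' 0,0': ['A'], ' 9,9': ['B']}, ''): A returns False, B returns False; on _is_connected_without({'x': ['A'], 'y': ['B']}, ''): A raises ValueError, B raises ValueError
import Mathlib
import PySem

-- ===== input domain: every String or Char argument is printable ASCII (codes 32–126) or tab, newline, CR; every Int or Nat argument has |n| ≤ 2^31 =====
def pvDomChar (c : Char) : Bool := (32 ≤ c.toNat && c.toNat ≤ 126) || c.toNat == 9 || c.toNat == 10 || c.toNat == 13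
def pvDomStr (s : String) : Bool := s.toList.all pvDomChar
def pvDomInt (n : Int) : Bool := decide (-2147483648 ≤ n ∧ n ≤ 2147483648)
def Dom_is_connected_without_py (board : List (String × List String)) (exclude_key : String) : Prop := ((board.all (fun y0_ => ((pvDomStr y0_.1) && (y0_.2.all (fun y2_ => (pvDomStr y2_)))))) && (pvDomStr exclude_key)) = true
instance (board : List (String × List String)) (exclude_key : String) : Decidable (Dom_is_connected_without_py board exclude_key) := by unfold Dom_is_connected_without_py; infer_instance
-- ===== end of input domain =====

-- B replaces A's deque-based BFS by queue-free label propagation to a fixpoint (objective: alternative, not faster).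


-- ===== SHARED HELPERS (used verbatim by both Pythons: _key, _parse_key, _neighbors, cell building) =====

-- f"{q},{r}"
def pvKey (q r : Int) : String := String.ofList (PySem.Int.toChars q ++ [','] ++ PySem.Int.toChars r)

-- _parse_key: parts = key.split(","); int(parts[0]), int(parts[1]).  none = where Python raises
-- (IndexError on a comma-free key, ValueError on a non-int part); such keys are excluded by Pre_.
def pvParse? (k : String) : Option (Int × Int) :=
  match PySem.Str.split? k "," with
  | some (p0 :: p1 :: _) =>
    match PySem.Int.ofStr? p0, PySem.Int.ofStr? p1 with
    | some q, some r => some (q, r)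
    | _, _ => none
  | _ => none

def pvDirections : List (Int × Int) := [(1, 0), (1, -1), (0, -1), (-1, 0), (-1, 1), (0, 1)]

-- _neighbors rendered as the six neighbor KEYS (both Pythons immediately re-key each neighbor)
def pvNbrs (q r : Int) : List String := pvDirections.map (fun d => pvKey (q + d.1) (r + d.2))

-- the identical cell-building loop of A and B (board is a Python dict: unique keys, insertion order)
def pvCellsOf (board : List (String × List String)) (exclude_key : String) : List String :=
  (PySem.Dict.ofList board).items.foldl
    (fun cells kv =>
      if kv.2 = [] then cells
      else if kv.1 = exclude_key then
        (if 1 < kv.2.length then PySem.Set.add cells kv.1 else cells)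
      else PySem.Set.add cells kv.1)
    []

-- ===== PORT A (BFS with a deque) =====

-- the BFS while-loop; fuel only makes it total (Python loops while the queue is nonempty;
-- the fuel given below is proved sufficient).  On an unparseable popped key Python raises: outside Pre_.
def pvBfs (cells : List String) : Nat → List String → List String → List String
  | 0, visited, _ => visited
  | _ + 1, visited, [] => visited
  | fuel + 1, visited, curr :: rest =>
    match pvParse? curr with
    | none => visited
    | some (q, r) =>
      let st := (pvNbrs q r).foldl
        (fun (st : List String × List String) nk =>
          if nk ∈ cells ∧ nk ∉ st.1 then (st.1 ++ [nk], st.2 ++ [nk]) else st)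
        (visited, rest)
      pvBfs cells fuel st.1 st.2

def is_connected_without_py (board : List (String × List String)) (exclude_key : String) : Bool :=
  let cells := pvCellsOf board exclude_key
  if cells.length ≤ 1 then true
  else
    match cells with
    | [] => true
    | start :: _ =>
      let visited := pvBfs cells (cells.length + 1) [start] [start]
      visited.length == cells.length

-- ===== PORT B (label propagation to a fixpoint; no queue) =====

-- one sweep: re-expand every visited cell against the cell set (Source B's inner `for d in visited` loop)
def pvExpand (cells visited : List String) : List String :=
  visited.foldl
    (fun acc d =>
      match pvParse? d with
      | none => acc
      | some (q, r) =>
        (pvNbrs q r).foldl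
          (fun acc nk => if nk ∈ cells ∧ nk ∉ acc then acc ++ [nk] else acc) acc)
    visited

-- Source B's `while True` loop: stop when a sweep adds nothing; fuel only makes it total
-- (the fuel given below is proved sufficient).
def pvSaturate (cells : List String) : Nat → List String → List String
  | 0, visited => visited
  | fuel + 1, visited =>
    let nxt := pvExpand cells visited
    if nxt.length = visited.length then visited else pvSaturate cells fuel nxt

def is_connected_without_py_alt (board : List (String × List String)) (exclude_key : String) : Bool :=
  let cells := pvCellsOf board exclude_key
  if cells.length ≤ 1 then true
  else
    match cells with
    | [] => true
    | start :: _ =>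
      let visited := pvSaturate cells (cells.length + 1) [start]
      visited.length == cells.length

-- ===== PRECONDITION & SPEC =====

-- k is canonically of the form f"{q},{r}"
def pvCanon (k : String) : Bool :=
  match pvParse? k with
  | some (q, r) => pvKey q r == k
  | none => false

-- Pre_ excludes boards where some remaining cell key is not a canonical "q,r" integer key: on such
-- boards A either raises (ValueError/IndexError in _parse_key) or its answer depends on CPython's
-- set-hash iteration order via `next(iter(cells))` — an accidental, unspecifiable corner; a board
-- with at most one remaining cell is always admitted (A answers True before parsing anything).
def Pre_is_connected_without_py (board : List (String × List String)) (exclude_key : String) : Prop :=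
  (pvCellsOf board exclude_key).length ≤ 1 ∨
    ∀ k ∈ pvCellsOf board exclude_key, pvCanon k = true

instance (board : List (String × List String)) (exclude_key : String) : Decidable (Pre_is_connected_without_py board exclude_key) := by
  unfold Pre_is_connected_without_py; infer_instance

def pvWitness_is_connected_without_py : (List (String × List String)) × String :=
  ([("0,0", ["A"]), ("1,0", ["B"]), ("1,-1", ["C"])], "1,0")

def Spec_is_connected_without_py (board : List (String × List String)) (exclude_key : String) (out : Bool) : Prop := out = is_connected_without_py_alt board exclude_key
instance (board : List (String × List String)) (exclude_key : String) (out : Bool) : Decidable (Spec_is_connected_without_py board exclude_key out) := by unfold Spec_is_connected_without_py; infer_instance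

-- ===== CLAIM (what is proved, stated in full; the proofs are below) =====
def Claim_equal_is_connected_without_py : Prop := ∀ (board : List (String × List String)) (exclude_key : String), Dom_is_connected_without_py board exclude_key → Pre_is_connected_without_py board exclude_key → Spec_is_connected_without_py board exclude_key (is_connected_without_py board exclude_key)

-- ===== LEMMAS AND PROOFS =====

-- directed edge of the hive graph both programs explore
def pvEdge (cells : List String) (d nk : String) : Prop :=
  ∃ q r, pvParse? d = some (q, r) ∧ nk ∈ pvNbrs q r ∧ nk ∈ cells

def pvClosed (cells : List String) (S : List String) : Prop :=
  ∀ d ∈ S, ∀ nk, pvEdge cells d nk → nk ∈ S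

theorem pv_nodup_subset_length {l m : List String} (h : l.Nodup) (hs : l ⊆ m) :
    l.length ≤ m.length := by
  have h1 : l.toFinset.card = l.length := List.toFinset_card_of_nodup h
  have h2 : l.toFinset ⊆ m.toFinset := by intro a ha; simp at *; exact hs ha
  have := Finset.card_le_card h2
  have h3 := m.toFinset_card_le
  omega

theorem pvStepB_spec (cells : List String) (L : List String) :
    ∀ acc : List String, acc.Nodup →
      ∃ add,
        L.foldl (fun acc nk => if nk ∈ cells ∧ nk ∉ acc then acc ++ [nk] else acc) acc
          = acc ++ add ∧
        (∀ x ∈ add, x ∈ L ∧ x ∈ cells ∧ x ∉ acc) ∧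
        (acc ++ add).Nodup ∧
        (∀ x ∈ L, x ∈ cells → x ∈ acc ++ add) := by
  induction L with
  | nil => intro acc h; exact ⟨[], by simp, by simp, by simpa using h, by simp⟩
  | cons a L ih =>
    intro acc hacc
    by_cases hg : a ∈ cells ∧ a ∉ acc
    · have hnd : (acc ++ [a]).Nodup := by
        simp [List.nodup_append, hacc]
        intro y hy h; exact hg.2 (h ▸ hy)
      obtain ⟨add, he, hmem, hnd2, hcov⟩ := ih (acc ++ [a]) hnd
      refine ⟨a :: add, ?_, ?_, ?_, ?_⟩
      · simp [List.foldl_cons, hg, he]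
      · intro x hx
        rcases List.mem_cons.mp hx with rfl | hx
        · exact ⟨List.mem_cons_self, hg.1, hg.2⟩
        · obtain ⟨h1, h2, h3⟩ := hmem x hx
          exact ⟨List.mem_cons_of_mem _ h1, h2, fun hc => h3 (by simp [hc])⟩
      · simpa using hnd2
      · intro x hx hxc
        rcases List.mem_cons.mp hx with rfl | hx
        · simp
        · have := hcov x hx hxc; simpa using this
    · obtain ⟨add, he, hmem, hnd2, hcov⟩ := ih acc hacc
      refine ⟨add, ?_, ?_, hnd2, ?_⟩
      · simp only [List.foldl_cons, if_neg hg]; exact he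
      · intro x hx
        obtain ⟨h1, h2, h3⟩ := hmem x hx
        exact ⟨List.mem_cons_of_mem _ h1, h2, h3⟩
      · intro x hx hxc
        rcases List.mem_cons.mp hx with rfl | hx
        · push Not at hg
          exact List.mem_append_left _ (hg hxc)
        · exact hcov x hx hxc

theorem pvStepA_spec (cells : List String) (L : List String) :
    ∀ (v q : List String), v.Nodup →
      ∃ add,
        L.foldl (fun (st : List String × List String) nk =>
            if nk ∈ cells ∧ nk ∉ st.1 then (st.1 ++ [nk], st.2 ++ [nk]) else st) (v, q)
          = (v ++ add, q ++ add) ∧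
        (∀ x ∈ add, x ∈ L ∧ x ∈ cells ∧ x ∉ v) ∧
        (v ++ add).Nodup ∧
        (∀ x ∈ L, x ∈ cells → x ∈ v ++ add) := by
  induction L with
  | nil => intro v q h; exact ⟨[], by simp, by simp, by simpa using h, by simp⟩
  | cons a L ih =>
    intro v q hv
    by_cases hg : a ∈ cells ∧ a ∉ v
    · have hnd : (v ++ [a]).Nodup := by
        simp [List.nodup_append, hv]
        intro y hy h; exact hg.2 (h ▸ hy)
      obtain ⟨add, he, hmem, hnd2, hcov⟩ := ih (v ++ [a]) (q ++ [a]) hnd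
      refine ⟨a :: add, ?_, ?_, ?_, ?_⟩
      · simp [List.foldl_cons, hg, he]
      · intro x hx
        rcases List.mem_cons.mp hx with rfl | hx
        · exact ⟨List.mem_cons_self, hg.1, hg.2⟩
        · obtain ⟨h1, h2, h3⟩ := hmem x hx
          exact ⟨List.mem_cons_of_mem _ h1, h2, fun hc => h3 (by simp [hc])⟩
      · simpa using hnd2
      · intro x hx hxc
        rcases List.mem_cons.mp hx with rfl | hx
        · simp
        · have := hcov x hx hxc; simpa using this
    · obtain ⟨add, he, hmem, hnd2, hcov⟩ := ih v q hv
      refine ⟨add, ?_, ?_, hnd2, ?_⟩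
      · simp only [List.foldl_cons, if_neg hg]; exact he
      · intro x hx
        obtain ⟨h1, h2, h3⟩ := hmem x hx
        exact ⟨List.mem_cons_of_mem _ h1, h2, h3⟩
      · intro x hx hxc
        rcases List.mem_cons.mp hx with rfl | hx
        · push Not at hg
          exact List.mem_append_left _ (hg hxc)
        · exact hcov x hx hxc

theorem pvExpandAux (cells : List String) :
    ∀ (D : List String) (acc : List String), acc.Nodup →
      ∃ add,
        D.foldl
          (fun acc d =>
            match pvParse? d with
            | none => acc
            | some (q, r) =>
              (pvNbrs q r).foldl
                (fun acc nk => if nk ∈ cells ∧ nk ∉ acc then acc ++ [nk] else acc) acc)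
          acc = acc ++ add ∧
        (∀ x ∈ add, ∃ d ∈ D, pvEdge cells d x) ∧
        (acc ++ add).Nodup ∧
        (∀ d ∈ D, ∀ nk, pvEdge cells d nk → nk ∈ acc ++ add) := by
  intro D
  induction D with
  | nil => intro acc h; exact ⟨[], by simp, by simp, by simpa using h, by simp⟩
  | cons d D ih =>
    intro acc hacc
    rcases hp : pvParse? d with _ | ⟨q, r⟩
    · obtain ⟨add, he, hsrc, hnd, hcov⟩ := ih acc hacc
      refine ⟨add, by simp only [List.foldl_cons, hp]; exact he, ?_, hnd, ?_⟩
      · intro x hx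
        obtain ⟨d', hd', he'⟩ := hsrc x hx
        exact ⟨d', List.mem_cons_of_mem _ hd', he'⟩
      · intro d' hd' nk hedge
        rcases List.mem_cons.mp hd' with rfl | hd'
        · obtain ⟨q', r', hp', _⟩ := hedge
          rw [hp] at hp'; cases hp'
        · exact hcov d' hd' nk hedge
    · obtain ⟨add1, he1, hmem1, hnd1, hcov1⟩ := pvStepB_spec cells (pvNbrs q r) acc hacc
      obtain ⟨add2, he2, hsrc2, hnd2, hcov2⟩ := ih (acc ++ add1) hnd1
      refine ⟨add1 ++ add2, ?_, ?_, by simpa [List.append_assoc] using hnd2, ?_⟩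
      · simp only [List.foldl_cons, hp, he1, he2, List.append_assoc]
      · intro x hx
        rcases List.mem_append.mp hx with hx | hx
        · obtain ⟨h1, h2, _⟩ := hmem1 x hx
          exact ⟨d, List.mem_cons_self, q, r, hp, h1, h2⟩
        · obtain ⟨d', hd', he'⟩ := hsrc2 x hx
          exact ⟨d', List.mem_cons_of_mem _ hd', he'⟩
      · intro d' hd' nk hedge
        rcases List.mem_cons.mp hd' with rfl | hd'
        · obtain ⟨q', r', hp', hn', hc'⟩ := hedge
          rw [hp] at hp'
          cases hp'
          have := hcov1 nk hn' hc'
          rw [← List.append_assoc]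
          exact List.mem_append_left _ this
        · have := hcov2 d' hd' nk hedge
          simpa [List.append_assoc] using this

theorem pvExpand_spec (cells visited : List String) (hv : visited.Nodup) :
    ∃ add,
      pvExpand cells visited = visited ++ add ∧
      (∀ x ∈ add, ∃ d ∈ visited, pvEdge cells d x) ∧
      (visited ++ add).Nodup ∧
      (∀ d ∈ visited, ∀ nk, pvEdge cells d nk → nk ∈ visited ++ add) :=
  pvExpandAux cells visited visited hv

theorem pvSaturate_spec (cells : List String) :
    ∀ fuel visited, visited.Nodup → visited ⊆ cells →
      cells.length + 1 ≤ fuel + visited.length →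
      (∀ x ∈ visited, x ∈ pvSaturate cells fuel visited) ∧
      (pvSaturate cells fuel visited).Nodup ∧
      (pvSaturate cells fuel visited) ⊆ cells ∧
      pvClosed cells (pvSaturate cells fuel visited) := by
  intro fuel
  induction fuel with
  | zero =>
    intro visited hnd hsub hfuel
    exact absurd (pv_nodup_subset_length hnd hsub) (by omega)
  | succ fuel ih =>
    intro visited hnd hsub hfuel
    obtain ⟨add, he, hsrc, hndx, hcov⟩ := pvExpand_spec cells visited hnd
    by_cases hfix : (pvExpand cells visited).length = visited.length
    · have hadd : add = [] := by
        have h := congrArg List.length he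
        rw [List.length_append, hfix] at h
        exact List.eq_nil_of_length_eq_zero (by omega)
      subst hadd
      have hres : pvSaturate cells (fuel + 1) visited = visited := by
        simp [pvSaturate, hfix]
      rw [hres]
      refine ⟨fun x hx => hx, hnd, hsub, ?_⟩
      intro d hd nk hedge
      simpa using hcov d hd nk hedge
    · have hres : pvSaturate cells (fuel + 1) visited = pvSaturate cells fuel (pvExpand cells visited) := by
        simp [pvSaturate, hfix]
      rw [hres]
      have hsubx : pvExpand cells visited ⊆ cells := by
        rw [he]
        intro x hx
        rcases List.mem_append.mp hx with hx | hx
        · exact hsub hx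
        · obtain ⟨d', _, _, _, _, _, hc⟩ := hsrc x hx
          exact hc
      have hlen : visited.length < (pvExpand cells visited).length := by
        have := congrArg List.length he
        simp [List.length_append] at this
        rcases Nat.eq_zero_or_pos add.length with h0 | h0
        · exfalso; apply hfix; omega
        · omega
      have := ih (pvExpand cells visited) (he ▸ hndx) hsubx (by omega)
      refine ⟨?_, this.2.1, this.2.2.1, this.2.2.2⟩
      intro x hx
      exact this.1 x (by rw [he]; exact List.mem_append_left _ hx)

theorem pvSaturate_sound (cells : List String) (S : List String) (hS : pvClosed cells S) :
    ∀ fuel visited, visited.Nodup → (∀ x ∈ visited, x ∈ S) →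
      ∀ x ∈ pvSaturate cells fuel visited, x ∈ S := by
  intro fuel
  induction fuel with
  | zero => intro visited _ hsub x hx; exact hsub x hx
  | succ fuel ih =>
    intro visited hnd hsub
    obtain ⟨add, he, hsrc, hndx, _⟩ := pvExpand_spec cells visited hnd
    by_cases hfix : (pvExpand cells visited).length = visited.length
    · intro x hx
      rw [show pvSaturate cells (fuel + 1) visited = visited by simp [pvSaturate, hfix]] at hx
      exact hsub x hx
    · intro x hx
      rw [show pvSaturate cells (fuel + 1) visited = pvSaturate cells fuel (pvExpand cells visited) by
        simp [pvSaturate, hfix]] at hx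
      refine ih (pvExpand cells visited) (he ▸ hndx) ?_ x hx
      intro y hy
      rw [he] at hy
      rcases List.mem_append.mp hy with hy | hy
      · exact hsub y hy
      · obtain ⟨d', hd', he'⟩ := hsrc y hy
        exact hS d' (hsub d' hd') y he'

theorem pvBfs_sound (cells : List String) (S : List String) (hS : pvClosed cells S) :
    ∀ fuel visited queue, visited.Nodup → (∀ x ∈ visited, x ∈ S) → (∀ x ∈ queue, x ∈ visited) →
      ∀ x ∈ pvBfs cells fuel visited queue, x ∈ S := by
  intro fuel
  induction fuel with
  | zero => intro visited queue _ hv _ x hx; exact hv x (by simpa [pvBfs] using hx)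
  | succ fuel ih =>
    intro visited queue hnd hv hq x hx
    match queue with
    | [] => exact hv x (by simpa [pvBfs] using hx)
    | curr :: rest =>
      rcases hp : pvParse? curr with _ | ⟨qq, rr⟩
      · rw [show pvBfs cells (fuel + 1) visited (curr :: rest) = visited by
          simp [pvBfs, hp]] at hx
        exact hv x hx
      · obtain ⟨add, he, hmem, hndx, hcov⟩ := pvStepA_spec cells (pvNbrs qq rr) visited rest hnd
        rw [show pvBfs cells (fuel + 1) visited (curr :: rest)
            = pvBfs cells fuel (visited ++ add) (rest ++ add) by
          simp only [pvBfs, hp]; rw [he]] at hx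
        have hvS : ∀ y ∈ visited ++ add, y ∈ S := by
          intro y hy
          rcases List.mem_append.mp hy with hy | hy
          · exact hv y hy
          · obtain ⟨h1, h2, _⟩ := hmem y hy
            exact hS curr (hv curr (hq curr List.mem_cons_self)) y ⟨qq, rr, hp, h1, h2⟩
        refine ih (visited ++ add) (rest ++ add) hndx hvS ?_ x hx
        intro y hy
        rcases List.mem_append.mp hy with hy | hy
        · exact List.mem_append_left _ (hq y (List.mem_cons_of_mem _ hy))
        · exact List.mem_append_right _ hy

theorem pvBfs_spec (cells : List String) (hpre : ∀ k ∈ cells, (pvParse? k).isSome) :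
    ∀ fuel visited queue, visited.Nodup → visited ⊆ cells →
      (∀ x ∈ queue, x ∈ visited) →
      (∀ v ∈ visited, v ∉ queue → ∀ nk, pvEdge cells v nk → nk ∈ visited) →
      (cells.filter (fun c => !decide (c ∈ visited))).length + queue.length ≤ fuel →
      (∀ x ∈ visited, x ∈ pvBfs cells fuel visited queue) ∧
      (pvBfs cells fuel visited queue).Nodup ∧
      (pvBfs cells fuel visited queue) ⊆ cells ∧
      pvClosed cells (pvBfs cells fuel visited queue) := by
  intro fuel
  induction fuel with
  | zero =>
    intro visited queue hnd hsub hq hcl hfuel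
    have hq0 : queue = [] := List.eq_nil_of_length_eq_zero (by omega)
    subst hq0
    exact ⟨fun x hx => by simpa [pvBfs] using hx, hnd, hsub,
      fun d hd nk he => hcl d hd (by simp) nk he⟩
  | succ fuel ih =>
    intro visited queue hnd hsub hq hcl hfuel
    match queue with
    | [] =>
      exact ⟨fun x hx => by simpa [pvBfs] using hx, hnd, hsub,
        fun d hd nk he => hcl d hd (by simp) nk he⟩
    | curr :: rest =>
      have hcurr : curr ∈ visited := hq curr List.mem_cons_self
      rcases hp : pvParse? curr with _ | ⟨qq, rr⟩
      · exact absurd (hpre curr (hsub hcurr)) (by simp [hp])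
      · obtain ⟨add, he, hmem, hndx, hcov⟩ := pvStepA_spec cells (pvNbrs qq rr) visited rest hnd
        have hres : pvBfs cells (fuel + 1) visited (curr :: rest)
            = pvBfs cells fuel (visited ++ add) (rest ++ add) := by
          simp only [pvBfs, hp]; rw [he]
        rw [hres]
        -- new invariants
        have hsubx : visited ++ add ⊆ cells := by
          intro x hx
          rcases List.mem_append.mp hx with hx | hx
          · exact hsub hx
          · exact (hmem x hx).2.1
        have hqx : ∀ x ∈ rest ++ add, x ∈ visited ++ add := by
          intro x hx
          rcases List.mem_append.mp hx with hx | hx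
          · exact List.mem_append_left _ (hq x (List.mem_cons_of_mem _ hx))
          · exact List.mem_append_right _ hx
        have hclx : ∀ v ∈ visited ++ add, v ∉ rest ++ add →
            ∀ nk, pvEdge cells v nk → nk ∈ visited ++ add := by
          intro v hv hvq nk hedge
          rcases List.mem_append.mp hv with hv | hv
          · by_cases hvc : v = curr
            · subst hvc
              obtain ⟨q', r', hp', hn', hc'⟩ := hedge
              rw [hp] at hp'; cases hp'
              exact hcov nk hn' hc'
            · have : v ∉ curr :: rest := by
                intro hmm
                rcases List.mem_cons.mp hmm with h | h
                · exact hvc h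
                · exact hvq (List.mem_append_left _ h)
              exact List.mem_append_left _ (hcl v hv this nk hedge)
          · exact absurd (List.mem_append_right rest hv) hvq
        -- fuel bookkeeping
        have hnodupadd : add.Nodup := (List.nodup_append.mp hndx).2.1
        have hfuelx : (cells.filter (fun c => !decide (c ∈ visited ++ add))).length
            + (rest ++ add).length ≤ fuel := by
          have hff : cells.filter (fun c => !decide (c ∈ visited ++ add))
              = (cells.filter (fun c => !decide (c ∈ visited))).filter (fun c => !decide (c ∈ add)) := by
            rw [List.filter_filter]
            apply List.filter_congr
            intro x _
            simp [List.mem_append]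
            exact Bool.and_comm _ _
          have hsplit := List.length_eq_length_filter_add
            (l := cells.filter (fun c => !decide (c ∈ visited))) (f := fun c => decide (c ∈ add))
          have haddsub : add ⊆ (cells.filter (fun c => !decide (c ∈ visited))).filter
              (fun c => decide (c ∈ add)) := by
            intro a ha
            obtain ⟨_, h2, h3⟩ := hmem a ha
            simp [List.mem_filter, h2, h3, ha]
          have hle := pv_nodup_subset_length hnodupadd haddsub
          have : ((cells.filter (fun c => !decide (c ∈ visited))).filter
              (fun c => !decide (c ∈ add))).length
              = (cells.filter (fun c => !decide (c ∈ visited))).length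
                - ((cells.filter (fun c => !decide (c ∈ visited))).filter
                    (fun c => decide (c ∈ add))).length := by
            omega
          rw [hff]
          simp only [List.length_append] at hfuel ⊢
          simp only [List.length_cons] at hfuel
          omega
        have := ih (visited ++ add) (rest ++ add) hndx hsubx hqx hclx hfuelx
        refine ⟨?_, this.2.1, this.2.2.1, this.2.2.2⟩
        intro x hx
        exact this.1 x (List.mem_append_left _ hx)


-- ===== VERDICT (by name: the statement is the Claim_ definition above) =====
theorem is_connected_without_py_spec : Claim_equal_is_connected_without_py := by
  intro board exclude_key _hdom hpre
  unfold Spec_is_connected_without_py is_connected_without_py is_connected_without_py_alt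
  unfold Pre_is_connected_without_py at hpre
  simp only []
  generalize hc : pvCellsOf board exclude_key = cells at hpre ⊢
  by_cases hlen : cells.length ≤ 1
  · simp [hlen]
  · simp only [hlen, if_false]
    cases cells with
    | nil => simp at hlen
    | cons start restc =>
      show ((pvBfs (start :: restc) ((start :: restc).length + 1) [start] [start]).length
              == (start :: restc).length)
          = ((pvSaturate (start :: restc) ((start :: restc).length + 1) [start]).length
              == (start :: restc).length)
      have hstart : start ∈ start :: restc := List.mem_cons_self
      have hparse : ∀ k ∈ start :: restc, (pvParse? k).isSome := by
        intro k hk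
        rcases hpre with h | h
        · exact absurd h hlen
        · have := h k hk
          unfold pvCanon at this
          rcases hp : pvParse? k with _ | p
          · rw [hp] at this; simp at this
          · rfl
      have hnd0 : ([start] : List String).Nodup := by simp
      have hsub0 : [start] ⊆ start :: restc := by
        intro y hy; rcases List.mem_singleton.mp hy with rfl; exact hstart
      have hA := pvBfs_spec (start :: restc) hparse ((start :: restc).length + 1)
        [start] [start] hnd0 hsub0
        (fun x hx => hx)
        (fun v hv hvq _ _ => absurd hv hvq)
        (by
          have := List.length_filter_le (fun c => !decide (c ∈ ([start] : List String)))
            (start :: restc)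
          simp only [List.length_singleton]
          omega)
      have hB := pvSaturate_spec (start :: restc) ((start :: restc).length + 1) [start]
        hnd0 hsub0 (by simp only [List.length_singleton]; omega)
      have hAB : ∀ x, x ∈ pvBfs (start :: restc) ((start :: restc).length + 1) [start] [start]
          ↔ x ∈ pvSaturate (start :: restc) ((start :: restc).length + 1) [start] := by
        intro x
        constructor
        · intro hx
          exact pvBfs_sound (start :: restc) _ hB.2.2.2 ((start :: restc).length + 1)
            [start] [start] hnd0
            (fun y hy => by
              rcases List.mem_singleton.mp hy with rfl
              exact hB.1 y (by simp))
            (fun y hy => hy) x hx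
        · intro hx
          exact pvSaturate_sound (start :: restc) _ hA.2.2.2 ((start :: restc).length + 1)
            [start] hnd0
            (fun y hy => by
              rcases List.mem_singleton.mp hy with rfl
              exact hA.1 y (by simp))
            x hx
      have hperm := (List.perm_ext_iff_of_nodup hA.2.1 hB.2.1).mpr hAB
      rw [hperm.length_eq]
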